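-- pv_equiv track=rewrite | github.com/imulan/procon | codeforces/1176A.py | f
-- ===== SOURCE A (Python) =====
-- def f(n):
--     a = 0
--     while n%5 == 0:
--         n //= 5
--         n *= 4
--         a += 1
--
--     while n%3 == 0:
--         n //= 3
--         n *= 2
--         a += 1
--
--     while n%2 == 0:
--         n //= 2
--         a += 1
--
--     if n != 1:
--         return -1
--     return a
-- ===== SOURCE B (Python) =====
-- def _extract(n, p):
--     """Divide out all factors of p from n, returning (reduced n, exponent)."""
--     e = 0
--     while n % p == 0:
--         n //= p
--         e += 1
--     return n, e
--
-- def f(n):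
--     n, d = _extract(n, 5)
--     n, c = _extract(n, 3)
--     n, b = _extract(n, 2)
--     return b + 2 * c + 3 * d if n == 1 else -1
-- ===== Notes on version B (the rewrite author's own statement) =====
-- stated objective: simpler
-- what changed: B removes A's simulation of the reduction process (multiplying back by 4 and 2 after each division) and instead extracts the exponents of 5, 3, 2 directly with a shared helper, returning the closed-form weighted sum b + 2c + 3d.
import Mathlib
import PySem

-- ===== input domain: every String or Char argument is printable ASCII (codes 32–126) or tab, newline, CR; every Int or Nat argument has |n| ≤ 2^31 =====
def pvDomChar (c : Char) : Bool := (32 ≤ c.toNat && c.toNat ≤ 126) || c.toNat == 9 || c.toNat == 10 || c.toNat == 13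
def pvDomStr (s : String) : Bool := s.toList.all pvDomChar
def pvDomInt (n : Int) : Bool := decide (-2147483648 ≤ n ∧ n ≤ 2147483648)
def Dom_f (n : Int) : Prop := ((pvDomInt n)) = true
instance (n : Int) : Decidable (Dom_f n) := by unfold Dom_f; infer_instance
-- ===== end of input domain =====

-- B replaces A's step-by-step simulation (divide by 5 then multiply by 4, divide by 3 then
-- multiply by 2) by direct extraction of the exponents of 5, 3, 2 and the closed-form weighted
-- sum b + 2c + 3d; objective: simpler.

-- ===== PORT A =====
-- while n%5 == 0: n //= 5; n *= 4; a += 1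
-- (the 'n ≠ 0' conjunct in each loop guard is a totality guard only: on n = 0 the Python
--  loop never terminates, and n = 0 is excluded by Pre_f)
def fLoop5 (n a : Int) : Int × Int :=
  if h : PySem.Int.mod n 5 = 0 ∧ n ≠ 0 then
    fLoop5 (PySem.Int.floordiv n 5 * 4) (a + 1)
  else (n, a)
termination_by n.natAbs
decreasing_by
  obtain ⟨m, rfl⟩ := (PySem.Int.mod_eq_zero_iff_dvd _ _).1 h.1
  rw [PySem.Int.floordiv_eq_ediv_of_pos (by norm_num), Int.mul_ediv_cancel_left _ (by norm_num)]
  have hm : m ≠ 0 := by rintro rfl; simp at h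
  have : 0 < m.natAbs := Int.natAbs_pos.mpr hm
  simp [Int.natAbs_mul]; omega

-- while n%3 == 0: n //= 3; n *= 2; a += 1
def fLoop3 (n a : Int) : Int × Int :=
  if h : PySem.Int.mod n 3 = 0 ∧ n ≠ 0 then
    fLoop3 (PySem.Int.floordiv n 3 * 2) (a + 1)
  else (n, a)
termination_by n.natAbs
decreasing_by
  obtain ⟨m, rfl⟩ := (PySem.Int.mod_eq_zero_iff_dvd _ _).1 h.1
  rw [PySem.Int.floordiv_eq_ediv_of_pos (by norm_num), Int.mul_ediv_cancel_left _ (by norm_num)]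
  have hm : m ≠ 0 := by rintro rfl; simp at h
  have : 0 < m.natAbs := Int.natAbs_pos.mpr hm
  simp [Int.natAbs_mul]; omega

-- while n%2 == 0: n //= 2; a += 1
def fLoop2 (n a : Int) : Int × Int :=
  if h : PySem.Int.mod n 2 = 0 ∧ n ≠ 0 then
    fLoop2 (PySem.Int.floordiv n 2) (a + 1)
  else (n, a)
termination_by n.natAbs
decreasing_by
  obtain ⟨m, rfl⟩ := (PySem.Int.mod_eq_zero_iff_dvd _ _).1 h.1
  rw [PySem.Int.floordiv_eq_ediv_of_pos (by norm_num), Int.mul_ediv_cancel_left _ (by norm_num)]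
  have hm : m ≠ 0 := by rintro rfl; simp at h
  have : 0 < m.natAbs := Int.natAbs_pos.mpr hm
  simp [Int.natAbs_mul]; omega

def f (n : Int) : Int :=
  let p5 := fLoop5 n 0
  let p3 := fLoop3 p5.1 p5.2
  let p2 := fLoop2 p3.1 p3.2
  if p2.1 ≠ 1 then -1 else p2.2

-- ===== PORT B =====
-- _extract's while loop: while n % p == 0: n //= p; e += 1
-- ('n ≠ 0 ∧ 1 < p' are totality guards only: callers pass p ∈ {5,3,2} and Pre_f gives n ≠ 0,
--  where the Python loop terminates)
def extractLoop (n p e : Int) : Int × Int :=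
  if h : PySem.Int.mod n p = 0 ∧ n ≠ 0 ∧ 1 < p then
    extractLoop (PySem.Int.floordiv n p) p (e + 1)
  else (n, e)
termination_by n.natAbs
decreasing_by
  obtain ⟨m, rfl⟩ := (PySem.Int.mod_eq_zero_iff_dvd _ _).1 h.1
  rw [PySem.Int.floordiv_eq_ediv_of_pos (by omega), Int.mul_ediv_cancel_left _ (by omega)]
  have hm : m ≠ 0 := by rintro rfl; simp at h
  have h1 : 0 < m.natAbs := Int.natAbs_pos.mpr hm
  have h2 : 2 ≤ p.natAbs := by omega
  calc m.natAbs < 2 * m.natAbs := by omega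
    _ ≤ p.natAbs * m.natAbs := Nat.mul_le_mul_right _ h2
    _ = (p * m).natAbs := (Int.natAbs_mul p m).symm

def extract (n p : Int) : Int × Int := extractLoop n p 0

def f_alt (n : Int) : Int :=
  let r5 := extract n 5
  let r3 := extract r5.1 3
  let r2 := extract r3.1 2
  if r2.1 = 1 then r2.2 + 2 * r3.2 + 3 * r5.2 else -1

-- ===== PRECONDITION & SPEC =====
-- Pre_f excludes only n = 0, on which Python A (and B) never returns: 0 % 5 == 0 and 0 //= 5
-- leaves 0, so the first while loop runs forever.
def Pre_f (n : Int) : Prop := n ≠ 0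
instance (n : Int) : Decidable (Pre_f n) := by unfold Pre_f; infer_instance
def pvWitness_f : Int := 10

def Spec_f (n : Int) (out : Int) : Prop := out = f_alt n
instance (n : Int) (out : Int) : Decidable (Spec_f n out) := by unfold Spec_f; infer_instance

-- ===== CLAIM (what is proved, stated in full; the proofs are below) =====
def Claim_equal_f : Prop := ∀ (n : Int), Dom_f n → Pre_f n → Spec_f n (f n)

-- ===== LEMMAS AND PROOFS =====

-- proof-only reference function: the p-free part and the exponent of p in n (Nat-valued count)
def strip (p n : Int) : Int × Nat :=
  if h : PySem.Int.mod n p = 0 ∧ n ≠ 0 ∧ 1 < p then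
    let r := strip p (PySem.Int.floordiv n p)
    (r.1, r.2 + 1)
  else (n, 0)
termination_by n.natAbs
decreasing_by
  obtain ⟨m, rfl⟩ := (PySem.Int.mod_eq_zero_iff_dvd _ _).1 h.1
  rw [PySem.Int.floordiv_eq_ediv_of_pos (by omega), Int.mul_ediv_cancel_left _ (by omega)]
  have hm : m ≠ 0 := by rintro rfl; simp at h
  have h1 : 0 < m.natAbs := Int.natAbs_pos.mpr hm
  have h2 : 2 ≤ p.natAbs := by omega
  calc m.natAbs < 2 * m.natAbs := by omega
    _ ≤ p.natAbs * m.natAbs := Nat.mul_le_mul_right _ h2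
    _ = (p * m).natAbs := (Int.natAbs_mul p m).symm

lemma floordiv_ne_zero_of_guard {p n : Int}
    (h : PySem.Int.mod n p = 0 ∧ n ≠ 0 ∧ 1 < p) : PySem.Int.floordiv n p ≠ 0 := by
  obtain ⟨m, rfl⟩ := (PySem.Int.mod_eq_zero_iff_dvd _ _).1 h.1
  rw [PySem.Int.floordiv_eq_ediv_of_pos (by omega), Int.mul_ediv_cancel_left _ (by omega)]
  rintro rfl; simp at h

lemma strip_fst_ne_zero (p n : Int) (hn : n ≠ 0) : (strip p n).1 ≠ 0 := by
  fun_induction strip p n with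
  | case1 n h r ih => exact ih (floordiv_ne_zero_of_guard h)
  | case2 n h => exact hn

lemma extractLoop_eq_strip (n p e : Int) :
    extractLoop n p e = ((strip p n).1, e + ((strip p n).2 : Int)) := by
  fun_induction extractLoop n p e with
  | case1 n e h ih =>
    rw [strip, dif_pos h]
    simp only at ih ⊢
    rw [ih]
    push_cast; rw [Prod.mk.injEq]; exact ⟨rfl, by ring⟩
  | case2 n e h =>
    rw [strip, dif_neg h]; simp

-- a prime p ∤ 2 divides n * 2^k only when it divides n
lemma dvd_mul_two_pow_iff (p n : Int) (k : Nat) (hp : Prime p) (h2 : ¬ p ∣ 2) :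
    p ∣ n * 2 ^ k ↔ p ∣ n := by
  constructor
  · intro h
    rcases hp.dvd_mul.1 h with h | h
    · exact h
    · exact absurd (hp.dvd_of_dvd_pow h) h2
  · intro h; exact h.mul_right _

lemma fLoop5_shift : ∀ (n : Int) (k : Nat) (a : Int),
    fLoop5 (n * 2 ^ k) a
      = ((strip 5 n).1 * 2 ^ (k + 2 * (strip 5 n).2), a + ((strip 5 n).2 : Int)) := by
  intro n
  fun_induction strip 5 n with
  | case1 n h r ih =>
    intro k a
    obtain ⟨m, hnm⟩ := (PySem.Int.mod_eq_zero_iff_dvd _ _).1 h.1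
    have hfd : PySem.Int.floordiv n 5 = m := by
      rw [hnm, PySem.Int.floordiv_eq_ediv_of_pos (by norm_num),
        Int.mul_ediv_cancel_left _ (by norm_num)]
    have hguard : PySem.Int.mod (n * 2 ^ k) 5 = 0 ∧ n * 2 ^ k ≠ 0 := by
      refine ⟨(PySem.Int.mod_eq_zero_iff_dvd _ _).2 ?_, ?_⟩
      · exact (Dvd.intro m hnm.symm).mul_right _
      · exact mul_ne_zero h.2.1 (by positivity)
    rw [fLoop5, dif_pos hguard]
    have hstep : PySem.Int.floordiv (n * 2 ^ k) 5 * 4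
        = PySem.Int.floordiv n 5 * 2 ^ (k + 2) := by
      have h2 : n * 2 ^ k = 5 * (m * 2 ^ k) := by rw [hnm]; ring
      rw [h2, PySem.Int.floordiv_eq_ediv_of_pos (by norm_num),
        Int.mul_ediv_cancel_left _ (by norm_num), hfd]
      ring
    rw [hstep, ih (k + 2) (a + 1)]
    rw [show r = strip 5 (PySem.Int.floordiv n 5) from rfl]
    simp only
    rw [Prod.mk.injEq]
    constructor
    · have he : k + 2 + 2 * (strip 5 (PySem.Int.floordiv n 5)).2
          = k + 2 * ((strip 5 (PySem.Int.floordiv n 5)).2 + 1) := by omega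
      rw [he]
    · push_cast; ring
  | case2 n h =>
    intro k a
    have hng : ¬ (PySem.Int.mod (n * 2 ^ k) 5 = 0 ∧ n * 2 ^ k ≠ 0) := by
      rintro ⟨h1, h2⟩
      apply h
      refine ⟨(PySem.Int.mod_eq_zero_iff_dvd _ _).2 ?_, ?_, by norm_num⟩
      · exact (dvd_mul_two_pow_iff 5 n k (by norm_num) (by decide)).1
          ((PySem.Int.mod_eq_zero_iff_dvd _ _).1 h1)
      · rintro rfl; simp at h2
    rw [fLoop5, dif_neg hng]
    simp

lemma fLoop3_shift : ∀ (n : Int) (k : Nat) (a : Int),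
    fLoop3 (n * 2 ^ k) a
      = ((strip 3 n).1 * 2 ^ (k + (strip 3 n).2), a + ((strip 3 n).2 : Int)) := by
  intro n
  fun_induction strip 3 n with
  | case1 n h r ih =>
    intro k a
    obtain ⟨m, hnm⟩ := (PySem.Int.mod_eq_zero_iff_dvd _ _).1 h.1
    have hfd : PySem.Int.floordiv n 3 = m := by
      rw [hnm, PySem.Int.floordiv_eq_ediv_of_pos (by norm_num),
        Int.mul_ediv_cancel_left _ (by norm_num)]
    have hguard : PySem.Int.mod (n * 2 ^ k) 3 = 0 ∧ n * 2 ^ k ≠ 0 := by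
      refine ⟨(PySem.Int.mod_eq_zero_iff_dvd _ _).2 ?_, ?_⟩
      · exact (Dvd.intro m hnm.symm).mul_right _
      · exact mul_ne_zero h.2.1 (by positivity)
    rw [fLoop3, dif_pos hguard]
    have hstep : PySem.Int.floordiv (n * 2 ^ k) 3 * 2
        = PySem.Int.floordiv n 3 * 2 ^ (k + 1) := by
      have h2 : n * 2 ^ k = 3 * (m * 2 ^ k) := by rw [hnm]; ring
      rw [h2, PySem.Int.floordiv_eq_ediv_of_pos (by norm_num),
        Int.mul_ediv_cancel_left _ (by norm_num), hfd]
      ring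
    rw [hstep, ih (k + 1) (a + 1)]
    rw [show r = strip 3 (PySem.Int.floordiv n 3) from rfl]
    simp only
    rw [Prod.mk.injEq]
    constructor
    · have he : k + 1 + (strip 3 (PySem.Int.floordiv n 3)).2
          = k + ((strip 3 (PySem.Int.floordiv n 3)).2 + 1) := by omega
      rw [he]
    · push_cast; ring
  | case2 n h =>
    intro k a
    have hng : ¬ (PySem.Int.mod (n * 2 ^ k) 3 = 0 ∧ n * 2 ^ k ≠ 0) := by
      rintro ⟨h1, h2⟩
      apply h
      refine ⟨(PySem.Int.mod_eq_zero_iff_dvd _ _).2 ?_, ?_, by norm_num⟩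
      · exact (dvd_mul_two_pow_iff 3 n k (by norm_num) (by decide)).1
          ((PySem.Int.mod_eq_zero_iff_dvd _ _).1 h1)
      · rintro rfl; simp at h2
    rw [fLoop3, dif_neg hng]
    simp

lemma fLoop2_eq_strip : ∀ (n a : Int),
    fLoop2 n a = ((strip 2 n).1, a + ((strip 2 n).2 : Int)) := by
  intro n
  fun_induction strip 2 n with
  | case1 n h r ih =>
    intro a
    rw [fLoop2, dif_pos ⟨h.1, h.2.1⟩, ih (a + 1)]
    rw [show r = strip 2 (PySem.Int.floordiv n 2) from rfl]
    simp only
    rw [Prod.mk.injEq]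
    exact ⟨rfl, by push_cast; ring⟩
  | case2 n h =>
    intro a
    have hng : ¬ (PySem.Int.mod n 2 = 0 ∧ n ≠ 0) := by
      rintro ⟨h1, h2⟩; exact h ⟨h1, h2, by norm_num⟩
    rw [fLoop2, dif_neg hng]
    simp

lemma fLoop2_shift (n : Int) (hn : n ≠ 0) : ∀ (k : Nat) (a : Int),
    fLoop2 (n * 2 ^ k) a = ((strip 2 n).1, a + (k : Int) + ((strip 2 n).2 : Int)) := by
  intro k
  induction k with
  | zero => intro a; simpa using fLoop2_eq_strip n a
  | succ k ih =>
    intro a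
    have hguard : PySem.Int.mod (n * 2 ^ (k + 1)) 2 = 0 ∧ n * 2 ^ (k + 1) ≠ 0 := by
      refine ⟨(PySem.Int.mod_eq_zero_iff_dvd _ _).2 ?_, mul_ne_zero hn (by positivity)⟩
      exact Dvd.intro (n * 2 ^ k) (by ring)
    have hstep : PySem.Int.floordiv (n * 2 ^ (k + 1)) 2 = n * 2 ^ k := by
      have h2 : n * 2 ^ (k + 1) = 2 * (n * 2 ^ k) := by ring
      rw [h2, PySem.Int.floordiv_eq_ediv_of_pos (by norm_num),
        Int.mul_ediv_cancel_left _ (by norm_num)]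
    rw [fLoop2, dif_pos hguard, hstep, ih (a + 1)]
    rw [Prod.mk.injEq]
    exact ⟨rfl, by push_cast; ring⟩

-- ===== VERDICT (by name: the statement is the Claim_ definition above) =====
theorem f_spec : Claim_equal_f := by
  intro n _ hn
  unfold Spec_f f f_alt extract
  have h5 : fLoop5 n 0
      = ((strip 5 n).1 * 2 ^ (0 + 2 * (strip 5 n).2), 0 + ((strip 5 n).2 : Int)) := by
    simpa using fLoop5_shift n 0 0
  have hm5 : (strip 5 n).1 ≠ 0 := strip_fst_ne_zero 5 n hn
  have hm3 : (strip 3 (strip 5 n).1).1 ≠ 0 := strip_fst_ne_zero 3 _ hm5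
  rw [h5]
  simp only
  rw [fLoop3_shift (strip 5 n).1 (0 + 2 * (strip 5 n).2) (0 + ((strip 5 n).2 : Int))]
  simp only
  rw [fLoop2_shift (strip 3 (strip 5 n).1).1 hm3
    (0 + 2 * (strip 5 n).2 + (strip 3 (strip 5 n).1).2)
    (0 + ((strip 5 n).2 : Int) + ((strip 3 (strip 5 n).1).2 : Int))]
  simp only
  rw [extractLoop_eq_strip n 5 0]
  simp only
  rw [extractLoop_eq_strip (strip 5 n).1 3 0]
  simp only
  rw [extractLoop_eq_strip (strip 3 (strip 5 n).1).1 2 0]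
  simp only
  by_cases hone : (strip 2 (strip 3 (strip 5 n).1).1).1 = 1
  · rw [if_neg (by simp [hone]), if_pos hone]
    push_cast
    ring
  · rw [if_pos hone, if_neg hone]
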